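-- pv_equiv track=rewrite | github.com/thevibethinker/n5os-ode | N5/scripts/map_tags_to_vos.py | is_n5_only_tag
-- ===== SOURCE A (Python) =====
-- from typing import List, Dict, Optional
--
-- def is_n5_only_tag(tag: str, mapping: Dict) -> bool:
--     """Check if tag is N5-only (not synced to Howie)"""
--
--     n5_only = mapping.get("n5_only_tags", [])
--
--     # Check exact match
--     if tag in n5_only:
--         return True
--
--     # Check prefix match (e.g., #relationship:* matches #relationship:new)
--     for n5_tag in n5_only:
--         if n5_tag.endswith(":*"):
--             prefix = n5_tag[:-1]  # Remove *
--             if tag.startswith(prefix):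
--                 return True
--
--     return False
-- ===== SOURCE B (Python) =====
-- def is_n5_only_tag(tag: str, mapping) -> bool:
--     """Check if tag is N5-only (not synced to Howie)"""
--     # Enumerate every pattern that could match this tag (the tag itself, plus
--     # one wildcard pattern per colon position), then set-intersect with the list.
--     patterns = {tag}
--     for i, ch in enumerate(tag):
--         if ch == ":":
--             patterns.add(tag[: i + 1] + "*")
--     return not patterns.isdisjoint(mapping.get("n5_only_tags", []))
-- ===== Notes on version B (the rewrite author's own statement) =====
-- stated objective: alternative
-- what changed: B inverts the matching direction: instead of scanning the list testing each entry against the tag (exact membership plus a wildcard-prefix loop), it enumerates from the tag every pattern that could match it (the tag itself plus one 'prefix:*' candidate per colon position) and returns whether that candidate set intersects the list.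
import Mathlib
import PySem

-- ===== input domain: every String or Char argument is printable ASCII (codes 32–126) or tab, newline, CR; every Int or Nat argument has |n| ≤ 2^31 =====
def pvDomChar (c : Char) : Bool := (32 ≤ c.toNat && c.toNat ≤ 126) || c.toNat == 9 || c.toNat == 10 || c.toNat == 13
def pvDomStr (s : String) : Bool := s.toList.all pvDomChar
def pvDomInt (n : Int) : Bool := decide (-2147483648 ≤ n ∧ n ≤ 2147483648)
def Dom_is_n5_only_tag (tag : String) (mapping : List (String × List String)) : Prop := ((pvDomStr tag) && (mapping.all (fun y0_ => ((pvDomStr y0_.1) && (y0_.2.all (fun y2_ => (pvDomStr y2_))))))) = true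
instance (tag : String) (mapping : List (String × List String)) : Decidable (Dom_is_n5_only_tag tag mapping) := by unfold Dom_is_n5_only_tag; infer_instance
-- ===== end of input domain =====

-- B inverts the matching direction: instead of testing every list entry against the tag
-- (A's membership scan plus wildcard loop), it enumerates from the tag itself every pattern
-- that could match it (the tag, plus one 'prefix:*' pattern per colon position) and takes a
-- set-disjointness test against the list; objective: alternative.

-- ===== PORT A =====
-- the 'for n5_tag in n5_only' prefix loop of A
def pvPrefixScan (tag : String) : List String → Bool
  | [] => false
  | n5_tag :: rest =>
    if PySem.Str.endswith n5_tag ":*" then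
      let pre := PySem.Str.slice n5_tag none (some (-1))
      if PySem.Str.startswith tag pre then true
      else pvPrefixScan tag rest
    else pvPrefixScan tag rest

def is_n5_only_tag (tag : String) (mapping : List (String × List String)) : Bool :=
  let n5_only := (PySem.Dict.get? ⟨mapping⟩ "n5_only_tags").getD []
  if n5_only.contains tag then true
  else pvPrefixScan tag n5_only

-- ===== PORT B =====
def is_n5_only_tag_alt (tag : String) (mapping : List (String × List String)) : Bool :=
  let patterns : PySem.Set String :=
    (PySem.List.enumerate tag.toList 0).foldl
      (fun s ic =>
        if ic.2 == ':' then PySem.Set.add s (PySem.Str.slice tag none (some (ic.1 + 1)) ++ "*")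
        else s)
      (PySem.Set.ofList [tag])
  !(PySem.Set.isdisjoint patterns ((PySem.Dict.get? ⟨mapping⟩ "n5_only_tags").getD []))

-- ===== PRECONDITION & SPEC =====
def Spec_is_n5_only_tag (tag : String) (mapping : List (String × List String)) (out : Bool) : Prop := out = is_n5_only_tag_alt tag mapping
instance (tag : String) (mapping : List (String × List String)) (out : Bool) : Decidable (Spec_is_n5_only_tag tag mapping out) := by unfold Spec_is_n5_only_tag; infer_instance

-- ===== CLAIM (what is proved, stated in full; the proofs are below) =====
def Claim_equal_is_n5_only_tag : Prop := ∀ (tag : String) (mapping : List (String × List String)), Dom_is_n5_only_tag tag mapping → Spec_is_n5_only_tag tag mapping (is_n5_only_tag tag mapping)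

-- ===== LEMMAS AND PROOFS =====

-- the per-element wildcard test of A
def pvWild (tag n5 : String) : Bool :=
  PySem.Str.endswith n5 ":*" &&
    PySem.Str.startswith tag (PySem.Str.slice n5 none (some (-1)))

-- A's prefix loop is the any() of its per-element condition
theorem pv_scan_eq_any (tag : String) (l : List String) :
    pvPrefixScan tag l = l.any (pvWild tag) := by
  induction l with
  | nil => rfl
  | cons t rest ih =>
    simp only [pvPrefixScan, List.any_cons, ← ih, pvWild]
    cases he : PySem.Str.endswith t ":*" <;>
      cases hs : PySem.Str.startswith tag (PySem.Str.slice t none (some (-1))) <;>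
        simp

-- A as a single any() over the list
theorem pvA_eq_any (tag : String) (l : List String) :
    (if l.contains tag then true else pvPrefixScan tag l) =
      l.any (fun n5 => n5 == tag || pvWild tag n5) := by
  have : l.any (fun n5 => n5 == tag || pvWild tag n5)
      = (l.any (· == tag) || l.any (pvWild tag)) := by
    induction l with
    | nil => rfl
    | cons x xs ih =>
      simp only [List.any_cons, ih]
      cases (x == tag) <;> cases pvWild tag x <;> simp
  rw [this, List.any_beq', ← pv_scan_eq_any]
  cases hc : l.contains tag <;> simp

-- membership in a foldl of conditional Set.add's
theorem pv_mem_foldl_add (g : Int → String) (ps : List (Int × Char)) (s : PySem.Set String)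
    (x : String) :
    (x ∈ ps.foldl (fun s ic => if ic.2 == ':' then PySem.Set.add s (g ic.1) else s) s) ↔
      x ∈ s ∨ ∃ ic ∈ ps, ic.2 = ':' ∧ x = g ic.1 := by
  induction ps generalizing s with
  | nil => simp
  | cons p rest ih =>
    simp only [List.foldl_cons, List.mem_cons]
    by_cases hp : (p.2 == ':') = true
    · have hp' : p.2 = ':' := by simpa using hp
      simp only [if_pos hp, ih, PySem.Set.mem_add]
      constructor
      · rintro (⟨h | h⟩ | h)
        · exact Or.inl h
        · exact Or.inr ⟨p, Or.inl rfl, hp', h⟩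
        · obtain ⟨ic, hm, hc, hx⟩ := h; exact Or.inr ⟨ic, Or.inr hm, hc, hx⟩
      · rintro (h | ⟨ic, hm | hm, hc, hx⟩)
        · exact Or.inl (Or.inl h)
        · exact Or.inl (Or.inr (by rw [hm] at hx; exact hx))
        · exact Or.inr ⟨ic, hm, hc, hx⟩
    · simp only [if_neg hp, ih]
      constructor
      · rintro (h | ⟨ic, hm, hc, hx⟩)
        · exact Or.inl h
        · exact Or.inr ⟨ic, Or.inr hm, hc, hx⟩
      · rintro (h | ⟨ic, hm | hm, hc, hx⟩)
        · exact Or.inl h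
        · exact absurd (by rw [hm] at hc; simpa using hc) hp
        · exact Or.inr ⟨ic, hm, hc, hx⟩

-- the slice tag[:k+1] on the list side
theorem pv_slice_toList (tag : String) (k : Nat) :
    (PySem.Str.slice tag none (some ((k : Int) + 1)) ++ "*").toList
      = tag.toList.take (k + 1) ++ ['*'] := by
  simp only [String.toList_append, PySem.Str.toList_slice, PySem.Chars.slice_eq_listSlice,
    show ((k : Int) + 1) = ((k + 1 : Nat) : Int) by push_cast; ring,
    PySem.List.slice_to_natCast]
  rfl

-- characterisation of the candidate-pattern set B builds
theorem pv_mem_patterns (tag x : String) :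
    (x ∈ (PySem.List.enumerate tag.toList 0).foldl
        (fun s ic =>
          if ic.2 == ':' then PySem.Set.add s (PySem.Str.slice tag none (some (ic.1 + 1)) ++ "*")
          else s)
        (PySem.Set.ofList [tag])) ↔
      x = tag ∨ ∃ k, ∃ h : k < tag.toList.length,
        tag.toList[k] = ':' ∧ x.toList = tag.toList.take (k + 1) ++ ['*'] := by
  rw [pv_mem_foldl_add (fun i => PySem.Str.slice tag none (some (i + 1)) ++ "*")]
  simp only [PySem.Set.mem_ofList, List.mem_singleton]
  constructor
  · rintro (h | ⟨ic, hm, hc, hx⟩)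
    · exact Or.inl h
    · rw [PySem.List.mem_enumerate_iff] at hm
      obtain ⟨k, hk, hic⟩ := hm
      refine Or.inr ⟨k, hk, ?_, ?_⟩
      · rw [hic] at hc; exact hc
      · rw [hic] at hx; simp only at hx
        rw [hx, show ((0 : Int) + (k : Nat)) = (k : Int) by ring, pv_slice_toList]
  · rintro (h | ⟨k, hk, hc, hx⟩)
    · exact Or.inl h
    · refine Or.inr ⟨((0 : Int) + k, tag.toList[k]), ?_, hc, ?_⟩
      · rw [PySem.List.mem_enumerate_iff]; exact ⟨k, hk, rfl⟩
      · apply String.toList_inj.mp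
        rw [hx, show ((0 : Int) + (k : Nat)) = (k : Int) by ring, pv_slice_toList]

-- the colon-position existential is exactly A's wildcard test
theorem pv_wild_iff (tag n5 : String) :
    (∃ k, ∃ h : k < tag.toList.length,
        tag.toList[k] = ':' ∧ n5.toList = tag.toList.take (k + 1) ++ ['*']) ↔
      pvWild tag n5 = true := by
  unfold pvWild
  rw [Bool.and_eq_true]
  rw [show PySem.Str.endswith n5 ":*" = PySem.Chars.endswith n5.toList [':', '*'] by simp]
  rw [PySem.Chars.endswith_iff]
  rw [show PySem.Str.startswith tag (PySem.Str.slice n5 none (some (-1)))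
        = PySem.Chars.startswith tag.toList (PySem.Str.slice n5 none (some (-1))).toList by simp]
  rw [PySem.Str.slice_to_neg_one, PySem.Chars.startswith_iff]
  constructor
  · rintro ⟨k, hk, hc, hu⟩
    constructor
    · refine ⟨tag.toList.take k, ?_⟩
      rw [hu, List.take_succ_eq_append_getElem hk, hc]
      simp
    · rw [hu, List.dropLast_concat]
      exact List.take_prefix _ _
  · rintro ⟨⟨w, hw⟩, hpre⟩
    have hu : n5.toList = (w ++ [':']) ++ ['*'] := by rw [← hw]; simp
    have hdl : n5.toList.dropLast = w ++ [':'] := by rw [hu, List.dropLast_concat]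
    rw [hdl] at hpre
    obtain ⟨r, hr⟩ := hpre
    refine ⟨w.length, ?_, ?_, ?_⟩
    · rw [← hr]; simp
    · have hlen : w.length < tag.toList.length := by rw [← hr]; simp
      have h9 : tag.toList[w.length]? = some ':' := by
        rw [← hr, List.getElem?_append_left (by simp), List.getElem?_append_right (by simp)]
        simp
      rw [List.getElem?_eq_getElem hlen] at h9
      exact Option.some_injective _ h9
    · rw [hu]
      congr 1
      rw [← hr]
      exact (List.take_left' (by simp)).symm

-- ===== VERDICT (by name: the statement is the Claim_ definition above) =====
theorem is_n5_only_tag_spec : Claim_equal_is_n5_only_tag := by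
  intro tag mapping _
  unfold Spec_is_n5_only_tag is_n5_only_tag is_n5_only_tag_alt
  set l := (PySem.Dict.get? ⟨mapping⟩ "n5_only_tags").getD [] with hl
  rw [pvA_eq_any]
  rw [Bool.eq_iff_iff, List.any_eq_true, Bool.not_eq_true', ← Bool.not_eq_true,
    PySem.Set.isdisjoint_iff (α := String)]
  push Not
  constructor
  · rintro ⟨n5, hn5, hcond⟩
    refine ⟨n5, ?_, hn5⟩
    rw [pv_mem_patterns]
    rcases Bool.or_eq_true .. |>.mp hcond with h | h
    · exact Or.inl (by simpa using h)
    · exact Or.inr ((pv_wild_iff tag n5).mpr h)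
  · rintro ⟨x, hx, hxl⟩
    rw [pv_mem_patterns] at hx
    refine ⟨x, hxl, ?_⟩
    rcases hx with h | h
    · simp [h]
    · exact Bool.or_eq_true .. |>.mpr (Or.inr ((pv_wild_iff tag x).mp h))
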